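-- pv_equiv track=rewrite | github.com/sarveshwarans/EducativeIO | 2. Pattern Sliding Window/2_7.py | findLongestSubStringWithSameLettersAfterReplacement1
-- ===== SOURCE A (Python) =====
-- def findLongestSubStringWithSameLettersAfterReplacement1(kValue,inputArray):
--     charFrequency = {}
--     windowStart = 0
--     windowEnd = 0
--     maxSubStringCount = 0
--     maxRepeatCharacterCount = 0
--     for windowEnd in range(len(inputArray)):
--         currentChar = inputArray[windowEnd]
--         if currentChar not in charFrequency:
--             charFrequency[currentChar] = 0
--         charFrequency[currentChar]+=1
--         maxRepeatCharacterCount = max(maxRepeatCharacterCount,charFrequency[currentChar])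
--         if windowEnd-windowStart+1 - maxRepeatCharacterCount > kValue:
--             leftChar = inputArray[windowStart]
--             charFrequency[leftChar] -=1
--             if charFrequency[leftChar]==0:
--                 del charFrequency[leftChar]
--             windowStart+=1
--         maxSubStringCount = max(maxSubStringCount,windowEnd-windowStart+1)
--     return maxSubStringCount
-- ===== SOURCE B (Python) =====
-- def findLongestSubStringWithSameLettersAfterReplacement1(kValue, inputArray):
--     # Exhaustive scan: for each start index grow the window, maintaining exact
--     # character counts and the max frequency, and record every feasible window.
--     best = 0
--     for start in range(len(inputArray)):
--         counts = {}
--         maxFreq = 0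
--         for end in range(start, len(inputArray)):
--             ch = inputArray[end]
--             counts[ch] = counts.get(ch, 0) + 1
--             maxFreq = max(maxFreq, counts[ch])
--             length = end - start + 1
--             if length - maxFreq <= kValue:
--                 best = max(best, length)
--     return best
-- ===== Notes on version B (the rewrite author's own statement) =====
-- stated objective: alternative
-- what changed: Replaces A's single amortized sliding-window pass (with its subtle stale running max frequency) by a transparent exhaustive scan: for every start index grow the window once across the rest of the string with exact counts, recording every feasible window length.
import Mathlib
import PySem

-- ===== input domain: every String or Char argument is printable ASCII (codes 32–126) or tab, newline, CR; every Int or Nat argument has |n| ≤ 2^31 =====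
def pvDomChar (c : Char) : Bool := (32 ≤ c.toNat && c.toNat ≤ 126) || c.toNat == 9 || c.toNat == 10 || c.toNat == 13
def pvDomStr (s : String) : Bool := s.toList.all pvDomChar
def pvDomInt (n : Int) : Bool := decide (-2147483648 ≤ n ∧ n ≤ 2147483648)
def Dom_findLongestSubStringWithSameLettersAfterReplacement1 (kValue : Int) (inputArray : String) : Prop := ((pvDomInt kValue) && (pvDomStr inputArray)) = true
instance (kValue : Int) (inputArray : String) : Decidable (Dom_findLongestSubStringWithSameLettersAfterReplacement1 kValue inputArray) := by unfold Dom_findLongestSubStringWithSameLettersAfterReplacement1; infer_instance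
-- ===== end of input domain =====

-- B replaces A's subtle amortized sliding window (stale running max frequency) with a transparent
-- exhaustive scan over all start positions (objective: alternative; B is not faster).

-- ===== PORT A =====
-- literal port of A's single sliding-window pass; both string indexings are always in range
-- (0 ≤ windowStart ≤ windowEnd < len), so pyGetD's default ' ' is never read
def findLongestSubStringWithSameLettersAfterReplacement1 (kValue : Int) (inputArray : String) : Int :=
  let l := inputArray.toList
  let fin := (PySem.List.pyRange 0 (PySem.Str.len inputArray)).foldl
    (fun (st : PySem.Dict Char Int × Int × Int × Int) windowEnd =>
      let charFrequency := st.1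
      let windowStart := st.2.1
      let maxSubStringCount := st.2.2.1
      let maxRepeatCharacterCount := st.2.2.2
      let currentChar := PySem.List.pyGetD l windowEnd ' '
      let charFrequency := if charFrequency.contains currentChar then charFrequency
                           else charFrequency.insert currentChar 0
      let charFrequency := charFrequency.insert currentChar (charFrequency.getD currentChar 0 + 1)
      let maxRepeatCharacterCount := max maxRepeatCharacterCount (charFrequency.getD currentChar 0)
      let p :=
        if windowEnd - windowStart + 1 - maxRepeatCharacterCount > kValue then
          let leftChar := PySem.List.pyGetD l windowStart ' '
          let charFrequency := charFrequency.insert leftChar (charFrequency.getD leftChar 0 - 1)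
          let charFrequency := if charFrequency.getD leftChar 0 == 0 then charFrequency.erase leftChar
                               else charFrequency
          (charFrequency, windowStart + 1)
        else (charFrequency, windowStart)
      let charFrequency := p.1
      let windowStart := p.2
      let maxSubStringCount := max maxSubStringCount (windowEnd - windowStart + 1)
      (charFrequency, windowStart, maxSubStringCount, maxRepeatCharacterCount))
    ((PySem.Dict.empty : PySem.Dict Char Int), 0, 0, 0)
  fin.2.2.1

-- ===== PORT B =====
-- literal port of Source B: for every start, grow the window once over the rest of the string,
-- keeping exact counts and the running max frequency, recording every feasible window length
def findLongestSubStringWithSameLettersAfterReplacement1_alt (kValue : Int) (inputArray : String) : Int :=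
  let l := inputArray.toList
  let n := PySem.Str.len inputArray
  (PySem.List.pyRange 0 n).foldl
    (fun (best : Int) start =>
      let fin := (PySem.List.pyRange start n).foldl
        (fun (st : PySem.Dict Char Int × Int × Int) endIdx =>
          let counts := st.1
          let maxFreq := st.2.1
          let best := st.2.2
          let ch := PySem.List.pyGetD l endIdx ' '
          let counts := counts.insert ch (counts.getD ch 0 + 1)
          let maxFreq := max maxFreq (counts.getD ch 0)
          let length := endIdx - start + 1
          let best := if length - maxFreq ≤ kValue then max best length else best
          (counts, maxFreq, best))
        ((PySem.Dict.empty : PySem.Dict Char Int), 0, best)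
      fin.2.2)
    0

-- ===== PRECONDITION & SPEC =====
def Spec_findLongestSubStringWithSameLettersAfterReplacement1 (kValue : Int) (inputArray : String) (out : Int) : Prop := out = findLongestSubStringWithSameLettersAfterReplacement1_alt kValue inputArray
instance (kValue : Int) (inputArray : String) (out : Int) : Decidable (Spec_findLongestSubStringWithSameLettersAfterReplacement1 kValue inputArray out) := by unfold Spec_findLongestSubStringWithSameLettersAfterReplacement1; infer_instance

-- ===== CLAIM (what is proved, stated in full; the proofs are below) =====
def Claim_equal_findLongestSubStringWithSameLettersAfterReplacement1 : Prop := ∀ (kValue : Int) (inputArray : String), Dom_findLongestSubStringWithSameLettersAfterReplacement1 kValue inputArray → Spec_findLongestSubStringWithSameLettersAfterReplacement1 kValue inputArray (findLongestSubStringWithSameLettersAfterReplacement1 kValue inputArray)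

-- ===== LEMMAS AND PROOFS =====

def cntIn (l : List Char) (st e : Nat) (c : Char) : Nat := ((l.take e).drop st).count c

theorem cntIn_zero (l : List Char) (st e : Nat) (c : Char) (h : e ≤ st) : cntIn l st e c = 0 := by
  unfold cntIn
  have : (l.take e).length ≤ st := by simp [List.length_take]; omega
  rw [List.drop_eq_nil_of_le this]; rfl

theorem cntIn_append (l : List Char) (st e : Nat) (c : Char) (hse : st ≤ e) (hen : e < l.length) :
    cntIn l st (e+1) c = cntIn l st e c + (if l.getD e ' ' = c then 1 else 0) := by
  unfold cntIn
  rw [List.take_add_one, List.getElem?_eq_getElem hen]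
  rw [List.drop_append_of_le_length (by simp [List.length_take]; omega)]
  rw [List.count_append]
  have hg : l.getD e ' ' = l[e] := by simp [List.getD, List.getElem?_eq_getElem hen]
  rw [hg]
  congr 1
  simp [List.count_cons, List.count_nil]

theorem cntIn_shrink (l : List Char) (st e : Nat) (c : Char) (hse : st < e) (hsn : st < l.length) :
    cntIn l st e c = cntIn l (st+1) e c + (if l.getD st ' ' = c then 1 else 0) := by
  unfold cntIn
  have hst : st < (l.take e).length := by simp [List.length_take]; omega
  rw [List.drop_eq_getElem_cons hst]
  have h1 : (l.take e)[st] = l[st] := List.getElem_take ..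
  have hg : l.getD st ' ' = l[st] := by simp [List.getD, List.getElem?_eq_getElem hsn]
  rw [List.count_cons, h1, hg]
  by_cases hc : l[st] = c <;> simp [hc]

theorem cntIn_anti_start (l : List Char) (st' st e : Nat) (c : Char) (h : st' ≤ st) :
    cntIn l st e c ≤ cntIn l st' e c := by
  unfold cntIn
  have heq : (l.take e).drop st = ((l.take e).drop st').drop (st - st') := by
    rw [List.drop_drop]; congr 1; omega
  rw [heq]
  exact List.Sublist.count_le c (List.drop_sublist _ _)

theorem cntIn_mono_end (l : List Char) (st e e' : Nat) (c : Char) (h : e ≤ e') :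
    cntIn l st e c ≤ cntIn l st e' c := by
  unfold cntIn
  exact List.Sublist.count_le c (List.IsPrefix.sublist (List.IsPrefix.drop (List.take_prefix_take_left h) st))

theorem cntIn_extend_le (l : List Char) (st e e' : Nat) (c : Char) (h : e ≤ e') :
    cntIn l st e' c ≤ cntIn l st e c + (e' - e) := by
  induction e' with
  | zero => have : e = 0 := by omega
            subst this; simp
  | succ m ih =>
    rcases Nat.lt_or_ge e (m+1) with hlt | hge
    · rcases Nat.lt_or_ge m l.length with hm | hm
      · rcases Nat.lt_or_ge st (m+1) with hs | hs
        · rw [cntIn_append l st m c (by omega) hm]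
          have := ih (by omega)
          split <;> omega
        · rw [cntIn_zero l st (m+1) c (by omega)]; omega
      · have : cntIn l st (m+1) c = cntIn l st m c := by
          unfold cntIn
          rw [List.take_of_length_le (by omega), List.take_of_length_le (by omega)]
        rw [this]; have := ih (by omega); omega
    · have : e = m+1 := by omega
      subst this; simp
def stepA (k : Int) (l : List Char) (p : Nat × Nat) (j : Nat) : Nat × Nat :=
  let mr := max p.2 (cntIn l p.1 (j+1) (l.getD j ' '))
  if ((j : Int) - p.1 + 1 - mr > k) then (p.1 + 1, mr) else (p.1, mr)

def stA (k : Int) (l : List Char) : Nat → Nat × Nat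
  | 0 => (0, 0)
  | j+1 => stepA k l (stA k l j) j

theorem stA_fst_le (k : Int) (l : List Char) (j : Nat) : (stA k l j).1 ≤ j := by
  induction j with
  | zero => simp [stA]
  | succ m ih => simp only [stA, stepA]; split <;> simp <;> omega

theorem stA_fst_succ_le (k : Int) (l : List Char) (j : Nat) :
    (stA k l (j+1)).1 ≤ (stA k l j).1 + 1 := by
  simp only [stA, stepA]; split <;> simp

theorem stA_fst_mono_succ (k : Int) (l : List Char) (j : Nat) :
    (stA k l j).1 ≤ (stA k l (j+1)).1 := by
  simp only [stA, stepA]; split <;> simp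

theorem sizeA_mono (k : Int) (l : List Char) {j j' : Nat} (h : j ≤ j') :
    j - (stA k l j).1 ≤ j' - (stA k l j').1 := by
  induction j' with
  | zero => have : j = 0 := by omega
            subst this; omega
  | succ m ih =>
    rcases Nat.lt_or_ge j (m+1) with hlt | hge
    · have h1 := ih (by omega)
      have h2 := stA_fst_succ_le k l m
      have h3 := stA_fst_le k l m
      omega
    · have : j = m+1 := by omega
      subst this; omega

theorem stA_succ_snd (k : Int) (l : List Char) (j : Nat) :
    (stA k l (j+1)).2 = max (stA k l j).2 (cntIn l (stA k l j).1 (j+1) (l.getD j ' ')) := by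
  show (stepA k l (stA k l j) j).2 = _
  simp only [stepA]; split <;> rfl

theorem maxRep_ge (k : Int) (l : List Char) (j : Nat) (hj : j < l.length) (c : Char) :
    cntIn l (stA k l j).1 (j+1) c ≤ (stA k l (j+1)).2 := by
  induction j with
  | zero =>
    rw [stA_succ_snd]
    by_cases hc : l.getD 0 ' ' = c
    · rw [← hc]; exact le_max_right _ _
    · have h0 : cntIn l (stA k l 0).1 1 c = 0 := by
        show cntIn l 0 1 c = 0
        rw [cntIn_append l 0 0 c (by omega) hj, cntIn_zero l 0 0 c (by omega), if_neg hc]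
      simp [h0]
  | succ m ih =>
    rw [stA_succ_snd]
    by_cases hc : l.getD (m+1) ' ' = c
    · rw [← hc]; exact le_max_right _ _
    · have h1 : cntIn l (stA k l (m+1)).1 (m+1+1) c = cntIn l (stA k l (m+1)).1 (m+1) c := by
        rcases Nat.lt_or_ge (stA k l (m+1)).1 (m+2) with hs | hs
        · rw [cntIn_append l _ (m+1) c (by have := stA_fst_le k l (m+1); omega) hj, if_neg hc]; omega
        · rw [cntIn_zero l _ (m+1+1) c (by omega), cntIn_zero l _ (m+1) c (by omega)]
      have h2 : cntIn l (stA k l (m+1)).1 (m+1) c ≤ cntIn l (stA k l m).1 (m+1) c :=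
        cntIn_anti_start l _ _ _ c (stA_fst_mono_succ k l m)
      have h3 := ih (by omega)
      have h4 : (stA k l (m+1)).2 ≤ max (stA k l (m+1)).2 (cntIn l (stA k l (m+1)).1 (m+1+1) (l.getD (m+1) ' ')) := le_max_left _ _
      omega

theorem maxRep_wit (k : Int) (l : List Char) (j : Nat) :
    (stA k l j).2 = 0 ∨ ∃ t < j, (stA k l j).2 = cntIn l (stA k l t).1 (t+1) (l.getD t ' ') := by
  induction j with
  | zero => left; simp [stA]
  | succ m ih =>
    have hsnd := stA_succ_snd k l m
    rcases Nat.le_total (stA k l m).2 (cntIn l (stA k l m).1 (m+1) (l.getD m ' ')) with hle | hle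
    · right; exact ⟨m, by omega, by omega⟩
    · rcases ih with h0 | ⟨t, ht, heq⟩
      · left; omega
      · right; exact ⟨t, by omega, by omega⟩
theorem stA_succ_fst (k : Int) (l : List Char) (j : Nat) :
    (stA k l (j+1)).1 = if ((j : Int) - (stA k l j).1 + 1 - (stA k l (j+1)).2 > k)
      then (stA k l j).1 + 1 else (stA k l j).1 := by
  rw [stA_succ_snd]
  show (stepA k l (stA k l j) j).1 = _
  simp only [stepA]; split <;> rfl

def GoodW (k : Int) (l : List Char) (i L : Nat) : Prop :=
  i + L ≤ l.length ∧ ∃ c, (L : Int) - cntIn l i (i+L) c ≤ k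

theorem start_stays (k : Int) (l : List Char) (i L : Nat) (h : GoodW k l i L) :
    ∀ e, e ≤ i + L → (stA k l e).1 ≤ i := by
  obtain ⟨hiL, c, hc⟩ := h
  intro e
  induction e with
  | zero => intro _; simp [stA]
  | succ m ih =>
    intro hm
    rcases Nat.lt_or_ge m i with hmi | hmi
    · exact le_trans (stA_fst_le k l (m+1)) (by omega)
    · have hihm := ih (by omega)
      rcases Nat.lt_or_ge (stA k l m).1 i with hlt | hge
      · have := stA_fst_succ_le k l m
        omega
      · have hsti : (stA k l m).1 = i := by omega
        rw [stA_succ_fst, hsti]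
        have h1 : cntIn l i (m+1) c ≤ (stA k l (m+1)).2 := by
          rw [← hsti]; exact maxRep_ge k l m (by omega) c
        have h2 : cntIn l i (i+L) c ≤ cntIn l i (m+1) c + ((i+L) - (m+1)) :=
          cntIn_extend_le l i (m+1) (i+L) c (by omega)
        have : ¬ ((m : Int) - i + 1 - (stA k l (m+1)).2 > k) := by
          push Not
          have hcm : cntIn l i (m+1) c ≤ cntIn l i (i+L) c + (m+1) - (i+L) ∨ True := Or.inr trivial
          omega
        rw [if_neg this]

theorem A_complete (k : Int) (l : List Char) (i L : Nat) (h : GoodW k l i L) :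
    L ≤ l.length - (stA k l l.length).1 := by
  have h1 := start_stays k l i L h (i+L) (le_refl _)
  have h2 := sizeA_mono k l (j := i+L) (j' := l.length) h.1
  omega

theorem A_sound (k : Int) (l : List Char) (j : Nat) (hj : j ≤ l.length) :
    j - (stA k l j).1 = 0 ∨ ∃ i L, GoodW k l i L ∧ L = j - (stA k l j).1 := by
  induction j with
  | zero => left; simp [stA]
  | succ m ih =>
    have hle := stA_fst_le k l m
    rw [stA_succ_fst]
    split
    · rcases ih (by omega) with h0 | ⟨i, L, hg, hL⟩
      · left; omega
      · right; exact ⟨i, L, hg, by omega⟩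
    · rename_i hcond
      push Not at hcond
      right
      set st := (stA k l m).1 with hst
      set L := m + 1 - st with hL
      rcases maxRep_wit k l (m+1) with h0 | ⟨t, ht, heq⟩
      · refine ⟨st, L, ⟨by omega, 'a', ?_⟩, by omega⟩
        have h1 : st + L = m + 1 := by omega
        rw [h1]
        have h2 : (0:Nat) ≤ cntIn l st (m+1) 'a' := Nat.zero_le _
        omega
      · set c := l.getD t ' ' with hc
        set stt := (stA k l t).1 with hstt
        have httle : t - stt ≤ m - st := by
          have := sizeA_mono k l (j := t) (j' := m) (by omega)
          omega
        have hsttle := stA_fst_le k l t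
        rcases Nat.lt_or_ge (t+1) L with hcase | hcase
        · -- t+1 < L : window [0, L)
          refine ⟨0, L, ⟨by omega, c, ?_⟩, by omega⟩
          have hcnt : cntIn l stt (t+1) c ≤ cntIn l 0 (0+L) c := by
            calc cntIn l stt (t+1) c ≤ cntIn l 0 (t+1) c := cntIn_anti_start l 0 stt (t+1) c (by omega)
              _ ≤ cntIn l 0 (0+L) c := cntIn_mono_end l 0 (t+1) (0+L) c (by omega)
          omega
        · -- t+1 ≥ L : window [t+1-L, t+1)
          refine ⟨t+1-L, L, ⟨by omega, c, ?_⟩, by omega⟩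
          have hi0 : t + 1 - L + L = t + 1 := by omega
          rw [hi0]
          have hcnt : cntIn l stt (t+1) c ≤ cntIn l (t+1-L) (t+1) c :=
            cntIn_anti_start l (t+1-L) stt (t+1) c (by omega)
          omega
def mxB (l : List Char) (i : Nat) : Nat → Nat
  | 0 => 0
  | j+1 => max (mxB l i j) (cntIn l i (i+j+1) (l.getD (i+j) ' '))

def bB (k : Int) (l : List Char) (i b0 : Nat) : Nat → Nat
  | 0 => b0
  | j+1 => if ((j : Int) + 1 - mxB l i (j+1) ≤ k) then max (bB k l i b0 j) (j+1) else bB k l i b0 j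

def outB (k : Int) (l : List Char) : Nat → Nat
  | 0 => 0
  | i+1 => bB k l i (outB k l i) (l.length - i)

theorem mxB_ge (l : List Char) (i j : Nat) (hij : i + j ≤ l.length) (c : Char) :
    cntIn l i (i+j) c ≤ mxB l i j := by
  induction j with
  | zero => rw [cntIn_zero l i (i+0) c (by omega)]; exact Nat.zero_le _
  | succ m ih =>
    show cntIn l i (i+m+1) c ≤ mxB l i (m+1)
    by_cases hc : l.getD (i+m) ' ' = c
    · rw [← hc]
      exact le_max_right _ _
    · rw [cntIn_append l i (i+m) c (by omega) (by omega), if_neg hc]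
      have h1 := ih (by omega)
      have h2 : mxB l i m ≤ mxB l i (m+1) := le_max_left _ _
      omega

theorem mxB_wit (l : List Char) (i j : Nat) (hij : i + j ≤ l.length) :
    mxB l i j = 0 ∨ ∃ c, mxB l i j = cntIn l i (i+j) c := by
  induction j with
  | zero => left; rfl
  | succ m ih =>
    rcases Nat.le_total (cntIn l i (i+m+1) (l.getD (i+m) ' ')) (mxB l i m) with hle | hle
    · have hm : mxB l i (m+1) = mxB l i m := by
        show max (mxB l i m) (cntIn l i (i+m+1) (l.getD (i+m) ' ')) = mxB l i m
        omega
      rcases ih (by omega) with h0 | ⟨c, hcc⟩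
      · left; omega
      · right; refine ⟨c, ?_⟩
        have h1 : cntIn l i (i+m) c ≤ cntIn l i (i+(m+1)) c := cntIn_mono_end l i (i+m) (i+(m+1)) c (by omega)
        have h2 : cntIn l i (i+(m+1)) c ≤ mxB l i (m+1) := mxB_ge l i (m+1) (by omega) c
        omega
    · right
      refine ⟨l.getD (i+m) ' ', ?_⟩
      show max (mxB l i m) (cntIn l i (i+m+1) (l.getD (i+m) ' ')) = cntIn l i (i+m+1) (l.getD (i+m) ' ')
      omega

theorem bB_ge_b0 (k : Int) (l : List Char) (i b0 j : Nat) : b0 ≤ bB k l i b0 j := by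
  induction j with
  | zero => exact le_refl _
  | succ m ih =>
    show b0 ≤ bB k l i b0 (m+1)
    rw [bB]
    split
    · omega
    · exact ih

theorem bB_complete (k : Int) (l : List Char) (i b0 j j' : Nat) (hj : j' ≤ j)
    (hgood : (j' : Int) - mxB l i j' ≤ k) (h1 : 1 ≤ j') : j' ≤ bB k l i b0 j := by
  induction j with
  | zero => omega
  | succ m ih =>
    rcases Nat.lt_or_ge j' (m+1) with hlt | hge
    · have := ih (by omega)
      rw [bB]
      split <;> omega
    · have hj'e : j' = m+1 := by omega
      subst hj'e
      rw [bB]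
      have : ((m : Int) + 1 - mxB l i (m+1) ≤ k) := by push_cast at hgood ⊢; omega
      rw [if_pos this]
      omega

theorem bB_sound (k : Int) (l : List Char) (i b0 j : Nat) :
    bB k l i b0 j = b0 ∨ ∃ j', j' ≤ j ∧ 1 ≤ j' ∧ ((j' : Int) - mxB l i j' ≤ k) ∧ bB k l i b0 j = j' := by
  induction j with
  | zero => left; rfl
  | succ m ih =>
    rw [bB]
    split
    · rename_i hcond
      rcases Nat.le_total (bB k l i b0 m) (m+1) with hle | hle
      · right
        refine ⟨m+1, le_refl _, by omega, by push_cast; omega, by omega⟩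
      · have : max (bB k l i b0 m) (m+1) = bB k l i b0 m := by omega
        rw [this]
        rcases ih with h0 | ⟨j', hj', h1, hc, he⟩
        · left; exact h0
        · right; exact ⟨j', by omega, h1, hc, he⟩
    · rcases ih with h0 | ⟨j', hj', h1, hc, he⟩
      · left; exact h0
      · right; exact ⟨j', by omega, h1, hc, he⟩

theorem outB_mono (k : Int) (l : List Char) {i i' : Nat} (h : i ≤ i') :
    outB k l i ≤ outB k l i' := by
  induction i' with
  | zero => have : i = 0 := by omega
            subst this; exact le_refl _
  | succ m ih =>
    rcases Nat.lt_or_ge i (m+1) with hlt | hge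
    · exact le_trans (ih (by omega)) (by rw [outB]; exact bB_ge_b0 k l m (outB k l m) (l.length - m))
    · have : i = m+1 := by omega
      subst this; exact le_refl _

theorem B_complete (k : Int) (l : List Char) (i L : Nat) (h : GoodW k l i L) :
    L ≤ outB k l l.length := by
  obtain ⟨hiL, c, hc⟩ := h
  rcases Nat.eq_zero_or_pos L with h0 | hpos
  · omega
  · have hin : i < l.length := by omega
    have hmx : cntIn l i (i+L) c ≤ mxB l i L := mxB_ge l i L hiL c
    have hgood : (L : Int) - mxB l i L ≤ k := by
      have : (cntIn l i (i+L) c : Int) ≤ mxB l i L := by exact_mod_cast hmx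
      omega
    have h1 : L ≤ bB k l i (outB k l i) (l.length - i) :=
      bB_complete k l i (outB k l i) (l.length - i) L (by omega) hgood (by omega)
    have h2 : bB k l i (outB k l i) (l.length - i) = outB k l (i+1) := by rw [outB]
    have h3 := outB_mono k l (i := i+1) (i' := l.length) (by omega)
    omega

theorem B_sound (k : Int) (l : List Char) (j : Nat) (hj : j ≤ l.length) :
    outB k l j = 0 ∨ ∃ i L, GoodW k l i L ∧ outB k l j = L := by
  induction j with
  | zero => left; rfl
  | succ m ih =>
    rw [outB]
    rcases bB_sound k l m (outB k l m) (l.length - m) with h0 | ⟨j', hj', h1, hc, he⟩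
    · rw [h0]
      exact ih (by omega)
    · right
      rw [he]
      refine ⟨m, j', ⟨by omega, ?_⟩, rfl⟩
      rcases mxB_wit l m j' (by omega) with hm0 | ⟨c, hcc⟩
      · refine ⟨'a', ?_⟩
        rw [hm0] at hc
        have : (0:Nat) ≤ cntIn l m (m+j') 'a' := Nat.zero_le _
        omega
      · exact ⟨c, by omega⟩

theorem clean_eq (k : Int) (l : List Char) :
    l.length - (stA k l l.length).1 = outB k l l.length := by
  apply Nat.le_antisymm
  · rcases A_sound k l l.length (le_refl _) with h0 | ⟨i, L, hg, hL⟩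
    · omega
    · have := B_complete k l i L hg
      omega
  · rcases B_sound k l l.length (le_refl _) with h0 | ⟨i, L, hg, he⟩
    · omega
    · have := A_complete k l i L hg
      omega

-- dict getD-after-erase helpers
theorem find?_filter_ne (items : List (Char × Int)) (a c : Char) (h : c ≠ a) :
    (items.filter (fun p => !p.1 == a)).find? (fun p => p.1 == c) = items.find? (fun p => p.1 == c) := by
  induction items with
  | nil => rfl
  | cons p rest ih =>
    by_cases hpa : p.1 = a
    · have h1 : (decide (p.1 = a) : Bool) = true := by simp [hpa]
      have h2 : (p.1 == c) = false := by simp [hpa]; exact fun hh => h hh.symm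
      have h3 : (a == c) = false := by simp; exact fun hh => h hh.symm
      simp [hpa, h3, ih]
    · simp [hpa, List.find?_cons]
      split <;> simp_all
theorem getD_erase_ne (d : PySem.Dict Char Int) (a c : Char) (h : c ≠ a) :
    (d.erase a).getD c 0 = d.getD c 0 := by
  simp only [PySem.Dict.getD, PySem.Dict.get?, PySem.Dict.erase]
  rw [find?_filter_ne d.items a c h]
theorem getD_erase_self (d : PySem.Dict Char Int) (a : Char) :
    (d.erase a).getD a 0 = 0 := by
  simp only [PySem.Dict.getD, PySem.Dict.get?, PySem.Dict.erase]
  rw [List.find?_eq_none.2]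
  · rfl
  · intro p hp
    have := (List.mem_filter.1 hp).2
    simp at this ⊢
    exact fun hh => this (by simp [hh])

def fA (k : Int) (l : List Char) (st : PySem.Dict Char Int × Int × Int × Int) (windowEnd : Int) :
    PySem.Dict Char Int × Int × Int × Int :=
  let charFrequency := st.1
  let windowStart := st.2.1
  let maxSubStringCount := st.2.2.1
  let maxRepeatCharacterCount := st.2.2.2
  let currentChar := PySem.List.pyGetD l windowEnd ' '
  let charFrequency := if charFrequency.contains currentChar then charFrequency
                       else charFrequency.insert currentChar 0
  let charFrequency := charFrequency.insert currentChar (charFrequency.getD currentChar 0 + 1)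
  let maxRepeatCharacterCount := max maxRepeatCharacterCount (charFrequency.getD currentChar 0)
  let p :=
    if windowEnd - windowStart + 1 - maxRepeatCharacterCount > k then
      let leftChar := PySem.List.pyGetD l windowStart ' '
      let charFrequency := charFrequency.insert leftChar (charFrequency.getD leftChar 0 - 1)
      let charFrequency := if charFrequency.getD leftChar 0 == 0 then charFrequency.erase leftChar
                           else charFrequency
      (charFrequency, windowStart + 1)
    else (charFrequency, windowStart)
  let charFrequency := p.1
  let windowStart := p.2
  let maxSubStringCount := max maxSubStringCount (windowEnd - windowStart + 1)
  (charFrequency, windowStart, maxSubStringCount, maxRepeatCharacterCount)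

theorem fA_step (k : Int) (l : List Char) (n : Nat) (hn : n < l.length)
    (d : PySem.Dict Char Int)
    (hd : ∀ c, d.getD c 0 = (cntIn l (stA k l n).1 n c : Int)) :
    ∃ d', fA k l (d, ((stA k l n).1 : Int), ((n - (stA k l n).1 : Nat) : Int), ((stA k l n).2 : Int)) (n : Int)
        = (d', ((stA k l (n+1)).1 : Int), (((n+1) - (stA k l (n+1)).1 : Nat) : Int), ((stA k l (n+1)).2 : Int))
        ∧ ∀ c, d'.getD c 0 = (cntIn l (stA k l (n+1)).1 (n+1) c : Int) := by
  have hstle : (stA k l n).1 ≤ n := stA_fst_le k l n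
  set st := (stA k l n).1 with hstdef
  set mr := (stA k l n).2 with hmrdef
  have hcc : PySem.List.pyGetD l (n : Int) ' ' = l.getD n ' ' := PySem.List.pyGetD_natCast l n ' '
  set cc := l.getD n ' ' with hccdef
  -- step 1: the conditional default-insert does not change any getD value
  have hd1 : ∀ c, (if d.contains cc then d else d.insert cc 0).getD c 0 = (cntIn l st n c : Int) := by
    intro c
    split
    · exact hd c
    · rename_i hnc
      rw [PySem.Dict.getD_insert]
      by_cases hceq : c = cc
      · rw [if_pos hceq, hceq]
        have h0 := hd cc
        rw [PySem.Dict.getD_of_not_contains d 0 (by simpa using hnc)] at h0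
        omega
      · rw [if_neg hceq]
        exact hd c
  set d1 := if d.contains cc then d else d.insert cc 0 with hd1def
  -- step 2: increment of the current char
  have hd2 : ∀ c, (d1.insert cc (d1.getD cc 0 + 1)).getD c 0 = (cntIn l st (n+1) c : Int) := by
    intro c
    rw [PySem.Dict.getD_insert]
    rw [cntIn_append l st n c hstle hn]
    by_cases hceq : c = cc
    · rw [if_pos hceq, hceq, if_pos rfl, hd1 cc]
      push_cast
      ring
    · rw [if_neg hceq, if_neg (fun hh => hceq hh.symm), hd1 c]
      push_cast
      ring
  set d2 := d1.insert cc (d1.getD cc 0 + 1) with hd2def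
  -- the new running max is the clean one
  have hmr2 : max (mr : Int) (d2.getD cc 0) = ((stA k l (n+1)).2 : Int) := by
    rw [hd2 cc, stA_succ_snd, ← hccdef, ← hstdef, ← hmrdef]
    push_cast [Nat.cast_max]
    rfl
  have hlc : PySem.List.pyGetD l (st : Int) ' ' = l.getD st ' ' := PySem.List.pyGetD_natCast l st ' '
  set lc := l.getD st ' ' with hlcdef
  set d3 := d2.insert lc (d2.getD lc 0 - 1) with hd3def
  set d4 := if d3.getD lc 0 == 0 then d3.erase lc else d3 with hd4def
  have hshr : ∀ c, cntIn l st (n+1) c = cntIn l (st+1) (n+1) c + (if lc = c then 1 else 0) :=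
    fun c => cntIn_shrink l st (n+1) c (by omega) (by omega)
  have hd3 : ∀ c, d3.getD c 0 = (cntIn l (st+1) (n+1) c : Int) := by
    intro c
    rw [hd3def, PySem.Dict.getD_insert]
    by_cases hceq : c = lc
    · rw [if_pos hceq, hceq, hd2 lc]
      have := hshr lc
      rw [if_pos rfl] at this
      push_cast [this]
      ring
    · rw [if_neg hceq, hd2 c]
      have := hshr c
      rw [if_neg (fun hh => hceq hh.symm)] at this
      push_cast [this]
      ring
  have hd4 : ∀ c, d4.getD c 0 = (cntIn l (st+1) (n+1) c : Int) := by
    intro c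
    rw [hd4def]
    split
    · rename_i hz
      by_cases hclc : c = lc
      · rw [hclc, getD_erase_self]
        have := hd3 lc
        simp at hz
        omega
      · rw [getD_erase_ne d3 lc c hclc]
        exact hd3 c
    · exact hd3 c
  simp only [fA, hcc]
  rw [hmr2, hlc]
  by_cases hcond : ((n : Int) - (st : Int) + 1 - ((stA k l (n+1)).2 : Int) > k)
  · -- shrink step
    have hfst : (stA k l (n+1)).1 = st + 1 := by
      rw [stA_succ_fst, if_pos hcond]
    rw [if_pos hcond]
    refine ⟨d4, ?_, by rw [hfst]; exact hd4⟩
    simp only []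
    rw [hfst]
    have h1 : ((n + 1 - (st + 1) : Nat) : Int) = (n : Int) - st := by omega
    have h2 : ((n - st : Nat) : Int) = (n : Int) - st := by omega
    have h3 : max (((n - st : Nat)) : Int) ((n : Int) - ((st : Int) + 1) + 1) = ((n + 1 - (st + 1) : Nat) : Int) := by
      rw [h1, h2]
      have : (n : Int) - ((st : Int) + 1) + 1 = (n : Int) - st := by ring
      rw [this, max_self]
    rw [h3]
    rfl
  · -- no shrink
    have hfst : (stA k l (n+1)).1 = st := by
      rw [stA_succ_fst, if_neg hcond]
    rw [if_neg hcond]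
    refine ⟨d2, ?_, by rw [hfst]; exact hd2⟩
    simp only []
    rw [hfst]
    have h3 : max (((n - st : Nat)) : Int) ((n : Int) - (st : Int) + 1) = ((n + 1 - st : Nat) : Int) := by
      have h1 : ((n + 1 - st : Nat) : Int) = (n : Int) - st + 1 := by omega
      have h2 : ((n - st : Nat) : Int) = (n : Int) - st := by omega
      rw [h1, h2]
      omega
    rw [h3]
theorem foldA_inv (k : Int) (l : List Char) : ∀ (n : Nat), n ≤ l.length →
    ∃ d, (List.range n).foldl (fun st (j : Nat) => fA k l st (j : Int))
        ((PySem.Dict.empty : PySem.Dict Char Int), 0, 0, 0)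
        = (d, ((stA k l n).1 : Int), ((n - (stA k l n).1 : Nat) : Int), ((stA k l n).2 : Int))
      ∧ ∀ c, d.getD c 0 = (cntIn l (stA k l n).1 n c : Int) := by
  intro n
  induction n with
  | zero =>
    intro _
    refine ⟨PySem.Dict.empty, by simp [stA], fun c => ?_⟩
    rw [cntIn_zero l _ 0 c (by omega)]
    simp [PySem.Dict.getD_empty]
  | succ m ih =>
    intro hm
    obtain ⟨d, hfold, hgd⟩ := ih (by omega)
    rw [List.range_succ, List.foldl_append, hfold]
    simpa using fA_step k l m (by omega) d hgd

theorem portA_eq (k : Int) (s : String) :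
    findLongestSubStringWithSameLettersAfterReplacement1 k s
      = ((s.toList.length - (stA k s.toList s.toList.length).1 : Nat) : Int) := by
  obtain ⟨d, hfold, -⟩ := foldA_inv k s.toList s.toList.length (le_refl _)
  unfold findLongestSubStringWithSameLettersAfterReplacement1
  rw [PySem.Str.len_eq, PySem.List.pyRange_zero_natCast]
  simp only []
  rw [List.foldl_map]
  exact congrArg (fun p => p.2.2.1) hfold
def fB (k : Int) (l : List Char) (start : Int) (st : PySem.Dict Char Int × Int × Int) (endIdx : Int) :
    PySem.Dict Char Int × Int × Int :=
  let counts := st.1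
  let maxFreq := st.2.1
  let best := st.2.2
  let ch := PySem.List.pyGetD l endIdx ' '
  let counts := counts.insert ch (counts.getD ch 0 + 1)
  let maxFreq := max maxFreq (counts.getD ch 0)
  let length := endIdx - start + 1
  let best := if length - maxFreq ≤ k then max best length else best
  (counts, maxFreq, best)

theorem bB_succ (k : Int) (l : List Char) (i b0 j : Nat) :
    bB k l i b0 (j+1) = if ((j : Int) + 1 - mxB l i (j+1) ≤ k) then max (bB k l i b0 j) (j+1) else bB k l i b0 j := rfl

theorem mxB_succ (l : List Char) (i j : Nat) :
    mxB l i (j+1) = max (mxB l i j) (cntIn l i (i+j+1) (l.getD (i+j) ' ')) := rfl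

theorem fB_step (k : Int) (l : List Char) (i jj b0 : Nat) (hij : i + jj < l.length)
    (d : PySem.Dict Char Int) (hd : ∀ c, d.getD c 0 = (cntIn l i (i+jj) c : Int)) :
    ∃ d', fB k l (i : Int) (d, ((mxB l i jj : Nat) : Int), ((bB k l i b0 jj : Nat) : Int)) ((i : Int) + (jj : Int))
        = (d', ((mxB l i (jj+1) : Nat) : Int), ((bB k l i b0 (jj+1) : Nat) : Int))
      ∧ ∀ c, d'.getD c 0 = (cntIn l i (i+jj+1) c : Int) := by
  have hch : PySem.List.pyGetD l ((i : Int) + (jj : Int)) ' ' = l.getD (i+jj) ' ' := by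
    rw [show ((i : Int) + (jj : Int)) = ((i + jj : Nat) : Int) by push_cast; ring]
    exact PySem.List.pyGetD_natCast l (i+jj) ' '
  set ch := l.getD (i+jj) ' ' with hchdef
  have happ : ∀ c, cntIn l i (i+jj+1) c = cntIn l i (i+jj) c + (if ch = c then 1 else 0) :=
    fun c => cntIn_append l i (i+jj) c (by omega) (by omega)
  have hd' : ∀ c, (d.insert ch (d.getD ch 0 + 1)).getD c 0 = (cntIn l i (i+jj+1) c : Int) := by
    intro c
    rw [PySem.Dict.getD_insert]
    by_cases hceq : c = ch
    · rw [if_pos hceq, hceq, hd ch]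
      have := happ ch
      rw [if_pos rfl] at this
      push_cast [this]
      ring
    · rw [if_neg hceq, hd c]
      have := happ c
      rw [if_neg (fun hh => hceq hh.symm)] at this
      push_cast [this]
      ring
  set d2 := d.insert ch (d.getD ch 0 + 1) with hd2def
  have hmf : max ((mxB l i jj : Nat) : Int) (d2.getD ch 0) = ((mxB l i (jj+1) : Nat) : Int) := by
    rw [hd' ch, mxB_succ]
    have : cntIn l i (i+jj+1) ch = cntIn l i (i+jj+1) (l.getD (i+jj) ' ') := rfl
    rw [this]
    push_cast [Nat.cast_max]
    rfl
  simp only [fB, hch]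
  rw [hmf]
  refine ⟨d2, ?_, hd'⟩
  have hlen : ((i : Int) + (jj : Int) - (i : Int) + 1) = ((jj : Nat) : Int) + 1 := by ring
  rw [hlen, bB_succ]
  by_cases hc : ((jj : Int) + 1 - ((mxB l i (jj+1) : Nat) : Int) ≤ k)
  · rw [if_pos hc, if_pos (by exact_mod_cast hc)]
    rw [Nat.cast_max]
    rfl
  · rw [if_neg hc, if_neg (by exact_mod_cast hc)]

theorem innerB_inv (k : Int) (l : List Char) (i b0 : Nat) : ∀ (j : Nat), i + j ≤ l.length →
    ∃ d, (List.range j).foldl (fun st (jj : Nat) => fB k l (i : Int) st ((i : Int) + (jj : Int)))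
        ((PySem.Dict.empty : PySem.Dict Char Int), 0, ((b0 : Nat) : Int))
        = (d, ((mxB l i j : Nat) : Int), ((bB k l i b0 j : Nat) : Int))
      ∧ ∀ c, d.getD c 0 = (cntIn l i (i+j) c : Int) := by
  intro j
  induction j with
  | zero =>
    intro _
    refine ⟨PySem.Dict.empty, by simp [mxB, bB], fun c => ?_⟩
    rw [cntIn_zero l _ _ c (by omega)]
    simp [PySem.Dict.getD_empty]
  | succ m ih =>
    intro hm
    obtain ⟨d, hfold, hgd⟩ := ih (by omega)
    rw [List.range_succ, List.foldl_append, hfold]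
    simpa using fB_step k l i m b0 (by omega) d hgd

theorem portB_eq (k : Int) (s : String) :
    findLongestSubStringWithSameLettersAfterReplacement1_alt k s
      = ((outB k s.toList s.toList.length : Nat) : Int) := by
  unfold findLongestSubStringWithSameLettersAfterReplacement1_alt
  simp only []
  rw [PySem.Str.len_eq, PySem.List.pyRange_zero_natCast, List.foldl_map]
  set l := s.toList with hldef
  set n := l.length with hndef
  have main : ∀ (m : Nat), m ≤ n →
      (List.range m).foldl (fun (best : Int) (i : Nat) =>
        ((PySem.List.pyRange (i : Int) (n : Int)).foldl (fun st e => fB k l (i : Int) st e)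
          ((PySem.Dict.empty : PySem.Dict Char Int), 0, best)).2.2) 0
      = ((outB k l m : Nat) : Int) := by
    intro m
    induction m with
    | zero => intro _; rfl
    | succ mm ih =>
      intro hm
      rw [List.range_succ, List.foldl_append, ih (by omega)]
      simp only [List.foldl_cons, List.foldl_nil]
      have hpr : PySem.List.pyRange (mm : Int) (n : Int)
          = (List.range (n - mm)).map (fun kk => (mm : Int) + (kk : Nat)) := by
        have ht : ((n : Int) - (mm : Int)).toNat = n - mm := by omega
        rw [PySem.List.pyRange_one, ht]
      rw [hpr, List.foldl_map]
      obtain ⟨d, hfold, -⟩ := innerB_inv k l mm (outB k l mm) (n - mm) (by omega)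
      rw [hfold]
      show ((bB k l mm (outB k l mm) (n - mm) : Nat) : Int) = _
      rfl
  exact main n (le_refl _)

-- ===== VERDICT (by name: the statement is the Claim_ definition above) =====
theorem findLongestSubStringWithSameLettersAfterReplacement1_spec : Claim_equal_findLongestSubStringWithSameLettersAfterReplacement1 := by
  intro kValue inputArray _
  unfold Spec_findLongestSubStringWithSameLettersAfterReplacement1
  rw [portA_eq, portB_eq, clean_eq]
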